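-- pv_equiv track=rewrite | github.com/Jeswin-J/AI-Enabled-Phishing-Spam-Detection | PhishingDetector/features.py | count_vowels_in_domain
-- ===== SOURCE A (Python) =====
-- def count_vowels_in_domain(url):
--     """
--     Count the number of vowels in the domain portion of a URL.
--
--     Args:
--     url (str): The URL to count vowels in its domain.
--
--     Returns:
--     int: The number of vowels in the domain portion of the URL.
--     """
--     # Extract the domain from the URL
--     domain_start = url.find('//') + 2
--     domain_end = url.find('/', domain_start)
--     if domain_end == -1:
--         domain_end = len(url)
--     domain = url[domain_start:domain_end]
--
--     # Count the vowels in the domain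
--     vowels = 'aeiou'
--     vowel_count = sum(domain.count(vowel) for vowel in vowels)
--     return vowel_count
-- ===== SOURCE B (Python) =====
-- def count_vowels_in_domain(url):
--     # One fused pass: start right after '//' (A's exact start rule), walk the
--     # rest of the URL counting vowels, and stop at the first '/'. No separate
--     # end search, no slice of the domain, no per-vowel scans.
--     start = url.find('//') + 2
--     count = 0
--     for c in url[start:]:
--         if c == '/':
--             break
--         if c in 'aeiou':
--             count += 1
--     return count
-- ===== Notes on version B (the rewrite author's own statement) =====
-- stated objective: simpler
-- what changed: A extracts the domain with a second find for its end plus a slice and then runs five separate domain.count(vowel) scans summed by a generator; B fuses everything into one loop over the tail after '//' that counts vowels and breaks at the first '/', so the end-search, the slice and the five counting passes all disappear.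
import Mathlib
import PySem

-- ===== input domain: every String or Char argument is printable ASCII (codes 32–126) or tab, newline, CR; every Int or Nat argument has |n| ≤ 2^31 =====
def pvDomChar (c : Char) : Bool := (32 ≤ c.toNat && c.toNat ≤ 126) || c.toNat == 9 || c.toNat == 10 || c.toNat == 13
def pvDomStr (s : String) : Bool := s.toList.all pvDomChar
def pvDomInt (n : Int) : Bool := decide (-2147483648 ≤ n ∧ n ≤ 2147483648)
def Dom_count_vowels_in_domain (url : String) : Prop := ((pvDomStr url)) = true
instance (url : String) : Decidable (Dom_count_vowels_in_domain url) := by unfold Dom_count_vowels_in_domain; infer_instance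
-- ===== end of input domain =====

-- B fuses A's end-search + slice + five per-vowel .count scans into one loop over the
-- tail after '//' that counts vowels and stops at the first '/'; objective: simpler.


-- ===== PORT A =====
def count_vowels_in_domain (url : String) : Int :=
  let domain_start : Int := PySem.Str.find url "//" + 2
  let domain_end0 : Int := PySem.Str.findFrom url "/" domain_start
  let domain_end : Int := if domain_end0 = -1 then PySem.Str.len url else domain_end0
  let domain : String := PySem.Str.slice url (some domain_start) (some domain_end)
  (("aeiou".toList).map (fun vowel => (PySem.Str.count domain (String.ofList [vowel]) : Int))).sum

-- ===== PORT B =====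
-- B's for-loop with break: structural recursion over the remaining characters.
def pvVowelLoop : List Char → Int → Int
  | [], count => count
  | c :: rest, count =>
    if c = '/' then count
    else pvVowelLoop rest (if "aeiou".toList.contains c then count + 1 else count)

def count_vowels_in_domain_alt (url : String) : Int :=
  let start : Int := PySem.Str.find url "//" + 2
  pvVowelLoop (PySem.Str.slice url (some start) none).toList 0

-- ===== PRECONDITION & SPEC =====
def Spec_count_vowels_in_domain (url : String) (out : Int) : Prop := out = count_vowels_in_domain_alt url
instance (url : String) (out : Int) : Decidable (Spec_count_vowels_in_domain url out) := by unfold Spec_count_vowels_in_domain; infer_instance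

-- ===== CLAIM (what is proved, stated in full; the proofs are below) =====
def Claim_equal_count_vowels_in_domain : Prop := ∀ (url : String), Dom_count_vowels_in_domain url → Spec_count_vowels_in_domain url (count_vowels_in_domain url)

-- ===== LEMMAS AND PROOFS =====

-- Python str.count with a single-character needle is plain character counting.
lemma count_go_singleton (c : Char) : ∀ (s : List Char) (fuel acc : Nat), s.length ≤ fuel →
    PySem.Chars.count.go [c] fuel s acc = acc + s.count c := by
  intro s
  induction s with
  | nil => intro fuel acc _; cases fuel <;> simp [PySem.Chars.count.go]
  | cons h t ih =>
    intro fuel acc hle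
    cases fuel with
    | zero => simp at hle
    | succ f =>
      simp only [List.length_cons, Nat.succ_le_succ_iff] at hle
      by_cases hc : c = h
      · subst hc
        rw [show PySem.Chars.count.go [c] (f + 1) (c :: t) acc
              = PySem.Chars.count.go [c] f t (acc + 1) from by
            simp [PySem.Chars.count.go, List.isPrefixOf]]
        rw [ih f (acc + 1) hle, List.count_cons_self]
        omega
      · rw [show PySem.Chars.count.go [c] (f + 1) (h :: t) acc
              = PySem.Chars.count.go [c] f t acc from by
            simp [PySem.Chars.count.go, List.isPrefixOf, hc]]
        rw [ih f acc hle]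
        simp [Ne.symm hc]

lemma count_singleton (s : List Char) (c : Char) : PySem.Chars.count s [c] = s.count c := by
  simp [PySem.Chars.count]
  simpa using count_go_singleton c s s.length 0 le_rfl

-- Summing the five per-vowel counts equals one countP over the characters.
lemma sum_counts_eq_countP (t : List Char) :
    (['a','e','i','o','u'].map (fun v => (t.count v : Int))).sum
      = (t.countP (fun c => ['a','e','i','o','u'].contains c) : Int) := by
  induction t with
  | nil => simp
  | cons h t ih =>
    simp only [List.count_cons, List.countP_cons, List.map_cons, List.map_nil, List.sum_cons,
      List.sum_nil] at *
    push_cast at *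
    by_cases ha : h = 'a' <;> by_cases he : h = 'e' <;> by_cases hi : h = 'i' <;>
      by_cases ho : h = 'o' <;> by_cases hu : h = 'u' <;>
      simp_all <;> omega

-- B's loop counts the vowels of the prefix before the first '/'.
lemma pvVowelLoop_eq (d : List Char) : ∀ acc : Int,
    pvVowelLoop d acc
      = acc + ((d.takeWhile (· ≠ '/')).countP (fun c => ['a','e','i','o','u'].contains c) : Int) := by
  induction d with
  | nil => intro acc; simp [pvVowelLoop]
  | cons c t ih =>
    intro acc
    by_cases hc : c = '/'
    · subst hc; simp [pvVowelLoop, List.takeWhile]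
    · rw [show pvVowelLoop (c :: t) acc
            = pvVowelLoop t (if "aeiou".toList.contains c then acc + 1 else acc) from by
          simp [pvVowelLoop, hc]]
      rw [ih]
      have hv : "aeiou".toList = ['a','e','i','o','u'] := rfl
      rw [show (c :: t).takeWhile (· ≠ '/') = c :: t.takeWhile (· ≠ '/') from by
          simp [List.takeWhile, hc]]
      rw [List.countP_cons]
      simp only [hv]
      split_ifs <;> (push_cast; simp_all) <;> omega

-- take up to the index of the first '/' equals takeWhile (· ≠ '/').
lemma take_first_slash (d : List Char) : ∀ j : Nat, ['/'] <+: d.drop j →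
    (∀ i < j, ¬ ['/'] <+: d.drop i) → d.take j = d.takeWhile (· ≠ '/') := by
  induction d with
  | nil => intro j hj _; simp at hj
  | cons c t ih =>
    intro j hj hmin
    cases j with
    | zero =>
      simp only [List.drop_zero, List.cons_prefix_cons] at hj
      obtain ⟨rfl, -⟩ := hj
      simp [List.takeWhile]
    | succ j =>
      have hc : c ≠ '/' := by
        intro rfl
        exact hmin 0 (Nat.succ_pos _) (by simp [List.cons_prefix_cons])
      rw [show (c :: t).takeWhile (· ≠ '/') = c :: t.takeWhile (· ≠ '/') from by
          simp [List.takeWhile, hc]]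
      simp only [List.take_succ_cons, List.cons.injEq, true_and]
      exact ih j (by simpa using hj) (fun i hi => by
        have := hmin (i + 1) (by omega); simpa using this)

-- no '/' present: takeWhile keeps everything.
lemma takeWhile_of_no_slash (d : List Char) (h : ¬ ['/'] <:+: d) :
    d.takeWhile (· ≠ '/') = d := by
  have hm : '/' ∉ d := fun hmem => h ((List.singleton_infix_iff '/' d).mpr hmem)
  apply List.takeWhile_eq_self_iff.mpr
  intro x hx; simp; rintro rfl; exact hm hx

-- A's extracted domain is exactly the tail after '//' cut at the first '/'.
lemma domain_eq_takeWhile (l : List Char) (s : Nat) (hs : s ≤ l.length) :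
    PySem.List.slice l (some (s : Int))
        (some (if PySem.Chars.findFrom l ['/'] (s : Int) none = -1 then (l.length : Int)
               else PySem.Chars.findFrom l ['/'] (s : Int) none))
      = (l.drop s).takeWhile (· ≠ '/') := by
  rw [PySem.Chars.findFrom_natCast l ['/'] s hs]
  by_cases h : PySem.Chars.find (l.drop s) ['/'] = -1
  · rw [if_pos (by simp [h])]
    rw [PySem.List.slice_natCast l s l.length]
    rw [takeWhile_of_no_slash _ ((PySem.Chars.find_eq_neg_one_iff _ _).mp h)]
    rw [List.take_of_length_le (by simp)]
  · have hpos : 0 ≤ PySem.Chars.find (l.drop s) ['/'] := by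
      have := PySem.Chars.neg_one_le_find (l.drop s) ['/']
      omega
    obtain ⟨j, hj⟩ : ∃ j : Nat, PySem.Chars.find (l.drop s) ['/'] = (j : Int) :=
      ⟨(PySem.Chars.find (l.drop s) ['/']).toNat, (Int.toNat_of_nonneg hpos).symm⟩
    rw [hj]
    have h1 : ¬ ((j : Int) = -1) := by omega
    rw [if_neg h1]
    have h2 : ¬ ((s : Int) + (j : Int) = -1) := by omega
    rw [if_neg h2]
    have hcast : (s : Int) + (j : Int) = ((s + j : Nat) : Int) := by push_cast; ring
    rw [hcast, PySem.List.slice_natCast l s (s + j)]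
    rw [show s + j - s = j from by omega]
    have hspec := PySem.Chars.find_spec (s := l.drop s) (sub := ['/']) hpos
    rw [hj] at hspec
    simp only [Int.toNat_natCast] at hspec
    exact take_first_slash (l.drop s) j hspec.1 (fun i hi => hspec.2 i hi)

-- ===== VERDICT (by name: the statement is the Claim_ definition above) =====
theorem count_vowels_in_domain_spec : Claim_equal_count_vowels_in_domain := by
  intro url _
  unfold Spec_count_vowels_in_domain count_vowels_in_domain count_vowels_in_domain_alt
  simp only [PySem.Str.find_eq, PySem.Str.findFrom_eq, PySem.Str.len_eq, PySem.Str.count_eq,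
    PySem.Str.toList_slice, PySem.Chars.slice, String.toList_ofList,
    show "/".toList = ['/'] from rfl]
  set l := url.toList with hl
  have hfind := PySem.Chars.neg_one_le_find l "//".toList
  have hfle := PySem.Chars.find_le_length l "//".toList
  -- the start index as a Nat
  obtain ⟨s, hs⟩ : ∃ s : Nat, PySem.Chars.find l "//".toList + 2 = (s : Int) :=
    ⟨(PySem.Chars.find l "//".toList + 2).toNat, (Int.toNat_of_nonneg (by omega)).symm⟩
  -- A's five per-vowel counts, summed, are one countP over the domain characters
  have hcount : ∀ domain : List Char,
      (("aeiou".toList).map (fun vowel => ((PySem.Chars.count domain [vowel]) : Int))).sum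
        = (domain.countP (fun c => ['a','e','i','o','u'].contains c) : Int) := by
    intro domain
    have hc : ∀ v : Char, PySem.Chars.count domain [v] = domain.count v :=
      count_singleton domain
    simp only [show "aeiou".toList = ['a','e','i','o','u'] from rfl, List.map_cons,
      List.map_nil, hc]
    exact sum_counts_eq_countP domain
  rw [hs]
  by_cases hsl : s ≤ l.length
  · -- normal case: the start index is within the string
    rw [pvVowelLoop_eq, PySem.List.slice_from_natCast l s, domain_eq_takeWhile l s hsl, hcount]
    ring
  · -- start past the end: '//' absent and the url empty, everything degenerates to 0
    have hnf : PySem.Chars.find l "//".toList = -1 := by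
      by_contra hne
      have hsp := PySem.Chars.find_spec (s := l) (sub := "//".toList) (by omega)
      have hlen := List.IsPrefix.length_le hsp.1
      rw [List.length_drop] at hlen
      have hsub : ("//".toList).length = 2 := rfl
      rw [hsub] at hlen
      have heq : ((PySem.Chars.find l "//".toList).toNat : Int)
          = PySem.Chars.find l "//".toList := Int.toNat_of_nonneg (by omega)
      omega
    have hs1 : s = 1 := by omega
    have hl0 : l.length = 0 := by omega
    have hnil : l = [] := List.length_eq_zero_iff.mp hl0
    rw [hs1, hnil]
    decide
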